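-- pv_equiv track=rewrite | github.com/Hablna/advent_of_code | ADVENT2024/day14.py | find_christmas_tree
-- ===== SOURCE A (Python) =====
-- width = 101
--
-- height = 103
--
-- def get_position_at_time(p, t):
--     """Get robot position at time t"""
--     x = int(p[0])
--     y = int(p[1])
--     vx = int(p[2])
--     vy = int(p[3])
--
--     final_x = (x + vx * t) % width
--     final_y = (y + vy * t) % height
--     return final_x, final_y
--
-- def has_large_cluster(positions):
--     """Check if robots form a large cluster (potential Christmas tree)"""
--     if not positions:
--         return False
--
--     position_set = set(positions)
--     visited = set()
--
--     def get_cluster_size(start_x, start_y):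
--         if (start_x, start_y) in visited or (start_x, start_y) not in position_set:
--             return 0
--
--         visited.add((start_x, start_y))
--         size = 1
--
--         # Check 4 directions for connectivity (more restrictive than 8)
--         for dx, dy in [(0, 1), (0, -1), (1, 0), (-1, 0)]:
--             size += get_cluster_size(start_x + dx, start_y + dy)
--
--         return size
--
--     # Find the largest cluster
--     max_cluster_size = 0
--     for pos in positions:
--         if pos not in visited:
--             cluster_size = get_cluster_size(pos[0], pos[1])
--             max_cluster_size = max(max_cluster_size, cluster_size)
--
--     # Christmas tree likely has a cluster of at least 20% of robots
--     return max_cluster_size >= len(positions) * 0.2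
--
-- def find_christmas_tree(robots):
--     """Find when robots form a Christmas tree pattern"""
--     # Check first 10000 seconds (robots will cycle eventually)
--     for t in range(10000):
--         positions = []
--         for robot in robots:
--             pos = get_position_at_time(robot, t)
--             positions.append(pos)
--
--         # Check if this configuration has a large cluster
--         if has_large_cluster(positions):
--             return t
--
--     return -1  # Not found
-- ===== SOURCE B (Python) =====
-- width = 101
--
-- height = 103
--
--
-- def _has_big_component(positions):
--     """Largest 4-connected component via an iterative, explicit-stack flood
--     fill (no recursion); same threshold test as the original."""
--     if not positions:
--         return False
--     pts = set(positions)
--     seen = set()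
--     best = 0
--     for start in positions:
--         if start in seen:
--             continue
--         count = 0
--         stack = [start]
--         while stack:
--             p = stack.pop()
--             if p in seen or p not in pts:
--                 continue
--             seen.add(p)
--             count += 1
--             x, y = p
--             stack.extend(((x - 1, y), (x + 1, y), (x, y - 1), (x, y + 1)))
--         best = max(best, count)
--     return best >= len(positions) * 0.2
--
--
-- def find_christmas_tree(robots):
--     """Find when robots form a Christmas tree pattern.
--
--     Maintains the current positions incrementally (one modular step per tick)
--     instead of recomputing x + vx*t for every t."""
--     cur = [(x % width, y % height) for (x, y, vx, vy) in robots]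
--     vel = [(vx, vy) for (x, y, vx, vy) in robots]
--     for t in range(10000):
--         if _has_big_component(cur):
--             return t
--         cur = [((px + vx) % width, (py + vy) % height)
--                for (px, py), (vx, vy) in zip(cur, vel)]
--     return -1
-- ===== Notes on version B (the rewrite author's own statement) =====
-- stated objective: alternative
-- what changed: The recursive shared-visited DFS cluster search is replaced by an iterative explicit-stack flood fill, and positions are maintained incrementally ((p+v) mod size each tick) instead of being recomputed as (x+v*t) mod size for every t.
import Mathlib
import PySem

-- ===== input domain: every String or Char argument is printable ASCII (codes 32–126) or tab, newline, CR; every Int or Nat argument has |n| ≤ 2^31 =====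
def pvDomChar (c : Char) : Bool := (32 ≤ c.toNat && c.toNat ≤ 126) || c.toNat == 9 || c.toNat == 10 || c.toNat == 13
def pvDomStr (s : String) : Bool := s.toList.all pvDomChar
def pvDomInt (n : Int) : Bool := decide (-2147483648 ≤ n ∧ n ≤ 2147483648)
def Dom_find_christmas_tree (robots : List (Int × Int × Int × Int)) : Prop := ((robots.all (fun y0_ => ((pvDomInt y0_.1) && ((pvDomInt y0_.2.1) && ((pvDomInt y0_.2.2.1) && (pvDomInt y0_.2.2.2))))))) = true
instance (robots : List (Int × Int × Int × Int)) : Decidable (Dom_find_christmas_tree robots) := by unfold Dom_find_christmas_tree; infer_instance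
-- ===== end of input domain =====

-- B replaces the recursive shared-visited DFS by an iterative explicit-stack flood fill and
-- maintains positions incrementally ((p+v) mod size per tick) instead of recomputing (x+v*t) mod size;
-- return values are proved equal (objective: alternative).

-- Shared float-semantics helper: Python's `m >= n * 0.2` (both sources contain this exact
-- expression). 0.2 is the IEEE double 3602879701896397/2^54; n*0.2 rounds the product to
-- nearest-even; the integer comparison against the resulting double is exact. This model is
-- exact for n < 2^53 (every list length ever encountered); above that Python would double-round.
def pyGeTimesFifth (m : Int) (n : Nat) : Bool :=
  let N : Nat := n * 3602879701896397
  if N = 0 then decide (0 ≤ m)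
  else
    let s : Nat := (Nat.log2 N + 1) - 53
    let q : Nat := N >>> s
    let r : Nat := N % 2 ^ s
    let h : Nat := 2 ^ (s - 1)
    let rounded : Nat := if h < r ∨ (r = h ∧ q % 2 = 1) then q + 1 else q
    decide (((rounded * 2 ^ s : Nat) : Int) ≤ m * 2 ^ 54)

-- ===== PORT A =====

-- int(p[i]) on an int is the identity; width = 101, height = 103 inlined.
def get_position_at_time (p : Int × Int × Int × Int) (t : Int) : Int × Int :=
  let x := p.1
  let y := p.2.1
  let vx := p.2.2.1
  let vy := p.2.2.2
  (PySem.Int.mod (x + vx * t) 101, PySem.Int.mod (y + vy * t) 103)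

-- the inner recursive def of has_large_cluster; `fuel` only makes the recursion
-- structural — with fuel ≥ |position_set ∖ visited| (always true at the call site)
-- it never runs out, so the Python recursion is reproduced exactly.
def get_cluster_size (S : PySem.Set (Int × Int)) :
    Nat → (Int × Int) → PySem.Set (Int × Int) → PySem.Set (Int × Int) × Int
  | 0, _, visited => (visited, 0)
  | fuel + 1, p, visited =>
    if visited.contains p || !(S.contains p) then (visited, 0)
    else
      let v0 := visited.add p
      let r1 := get_cluster_size S fuel (p.1, p.2 + 1) v0
      let r2 := get_cluster_size S fuel (p.1, p.2 - 1) r1.1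
      let r3 := get_cluster_size S fuel (p.1 + 1, p.2) r2.1
      let r4 := get_cluster_size S fuel (p.1 - 1, p.2) r3.1
      (r4.1, 1 + r1.2 + r2.2 + r3.2 + r4.2)

def has_large_cluster (positions : List (Int × Int)) : Bool :=
  if positions.isEmpty then false
  else
    let position_set := PySem.Set.ofList positions
    let st := positions.foldl
      (fun (st : PySem.Set (Int × Int) × Int) pos =>
        if st.1.contains pos then st
        else
          let r := get_cluster_size position_set position_set.length pos st.1
          (r.1, max st.2 r.2))
      (PySem.Set.empty, 0)
    pyGeTimesFifth st.2 positions.length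

def find_loop (robots : List (Int × Int × Int × Int)) : Nat → Nat → Int
  | _, 0 => -1
  | t, rem + 1 =>
    let positions := robots.map (fun robot => get_position_at_time robot (t : Int))
    if has_large_cluster positions then (t : Int) else find_loop robots (t + 1) rem

def find_christmas_tree (robots : List (Int × Int × Int × Int)) : Int :=
  find_loop robots 0 10000

-- ===== PORT B =====

-- number of points of S not yet in V (termination measure of the flood fill)
def um (S V : PySem.Set (Int × Int)) : Nat := (S.filter (fun q => !(V.contains q))).length

theorem countP_lt_countP_of_witness {α : Type} (P Q : α → Bool)
    (himp : ∀ a, Q a = true → P a = true) :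
    ∀ (l : List α) (p : α), p ∈ l → P p = true → Q p = false →
      l.countP Q < l.countP P := by
  intro l
  induction l with
  | nil => intro p hp; simp at hp
  | cons a t ih =>
    intro p hp hP hQ
    rcases List.mem_cons.mp hp with rfl | hpt
    · have hle : t.countP Q ≤ t.countP P := List.countP_mono_left (fun a _ => himp a)
      simp [hP, hQ]
      omega
    · have := ih p hpt hP hQ
      by_cases hQa : Q a = true
      · have hPa := himp a hQa
        simp [hPa, hQa]
        omega
      · simp only [Bool.not_eq_true] at hQa
        by_cases hPa : P a = true <;> simp [hPa, hQa] <;> omega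

theorem um_add_lt (S V : PySem.Set (Int × Int)) (p : Int × Int)
    (hS : p ∈ S) (hV : p ∉ V) : um S (V.add p) < um S V := by
  unfold um
  rw [← List.countP_eq_length_filter, ← List.countP_eq_length_filter]
  apply countP_lt_countP_of_witness _ _ ?himp S p hS ?hP ?hQ
  case himp =>
    intro a ha
    simp only [PySem.Set.contains_eq_listContains, List.contains_eq_mem,
      Bool.not_eq_eq_eq_not, Bool.not_true, decide_eq_false_iff_not] at ha ⊢
    exact fun hav => ha ((PySem.Set.mem_add V p a).mpr (Or.inl hav))
  case hP => simp [hV]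
  case hQ => simp [(PySem.Set.mem_add V p p).mpr (Or.inr rfl)]

-- the while-loop of _has_big_component: stack with head = Python's list end (pop/extend)
def flood (pts : PySem.Set (Int × Int)) :
    List (Int × Int) → PySem.Set (Int × Int) → Int → PySem.Set (Int × Int) × Int
  | [], seen, count => (seen, count)
  | p :: stack, seen, count =>
    if seen.contains p || !(pts.contains p) then flood pts stack seen count
    else
      flood pts
        ((p.1, p.2 + 1) :: (p.1, p.2 - 1) :: (p.1 + 1, p.2) :: (p.1 - 1, p.2) :: stack)
        (seen.add p) (count + 1)
termination_by s v _ => (um pts v, s.length)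
decreasing_by
  · apply Prod.Lex.right
    simp
  · apply Prod.Lex.left
    rename_i hcond
    simp only [Bool.or_eq_true, Bool.not_eq_true', not_or] at hcond
    have hp : p ∈ pts := by have := hcond.2; simpa using this
    have hv : p ∉ seen := by have := hcond.1; simpa using this
    exact um_add_lt pts seen p hp hv

def has_big_component (positions : List (Int × Int)) : Bool :=
  if positions.isEmpty then false
  else
    let pts := PySem.Set.ofList positions
    let st := positions.foldl
      (fun (st : PySem.Set (Int × Int) × Int) start =>
        if st.1.contains start then st
        else
          let r := flood pts [start] st.1 0
          (r.1, max st.2 r.2))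
      (PySem.Set.empty, 0)
    pyGeTimesFifth st.2 positions.length

def step_positions (cur vel : List (Int × Int)) : List (Int × Int) :=
  (cur.zip vel).map
    (fun pv => (PySem.Int.mod (pv.1.1 + pv.2.1) 101, PySem.Int.mod (pv.1.2 + pv.2.2) 103))

def find_loop_alt (vel : List (Int × Int)) : List (Int × Int) → Nat → Nat → Int
  | _, _, 0 => -1
  | cur, t, rem + 1 =>
    if has_big_component cur then (t : Int)
    else find_loop_alt vel (step_positions cur vel) (t + 1) rem

def find_christmas_tree_alt (robots : List (Int × Int × Int × Int)) : Int :=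
  let cur := robots.map (fun r => (PySem.Int.mod r.1 101, PySem.Int.mod r.2.1 103))
  let vel := robots.map (fun r => (r.2.2.1, r.2.2.2))
  find_loop_alt vel cur 0 10000

-- ===== PRECONDITION & SPEC =====
def Spec_find_christmas_tree (robots : List (Int × Int × Int × Int)) (out : Int) : Prop := out = find_christmas_tree_alt robots
instance (robots : List (Int × Int × Int × Int)) (out : Int) : Decidable (Spec_find_christmas_tree robots out) := by unfold Spec_find_christmas_tree; infer_instance

-- ===== CLAIM (what is proved, stated in full; the proofs are below) =====
def Claim_equal_find_christmas_tree : Prop := ∀ (robots : List (Int × Int × Int × Int)), Dom_find_christmas_tree robots → Spec_find_christmas_tree robots (find_christmas_tree robots)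

-- ===== LEMMAS AND PROOFS =====

theorem get_cluster_size_mono (S : PySem.Set (Int × Int)) :
    ∀ (f : Nat) (p : Int × Int) (V : PySem.Set (Int × Int)) (q : Int × Int),
      q ∈ V → q ∈ (get_cluster_size S f p V).1 := by
  intro f
  induction f with
  | zero => intro p V q h; simpa [get_cluster_size] using h
  | succ f ih =>
    intro p V q h
    rw [get_cluster_size]
    by_cases hc : (V.contains p || !(S.contains p)) = true
    · rw [if_pos hc]
      exact h
    · rw [if_neg hc]
      dsimp only
      exact ih _ _ q (ih _ _ q (ih _ _ q (ih _ _ q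
        ((PySem.Set.mem_add V p q).mpr (Or.inl h)))))

theorem um_mono (S V V' : PySem.Set (Int × Int))
    (h : ∀ q, q ∈ V → q ∈ V') : um S V' ≤ um S V := by
  unfold um
  rw [← List.countP_eq_length_filter, ← List.countP_eq_length_filter]
  apply List.countP_mono_left
  intro a _ ha
  simp only [PySem.Set.contains_eq_listContains, List.contains_eq_mem,
    Bool.not_eq_eq_eq_not, Bool.not_true, decide_eq_false_iff_not] at ha ⊢
  exact fun hav => ha (h a hav)

theorem um_zero_mem (S V : PySem.Set (Int × Int)) (p : Int × Int)
    (h : um S V = 0) (hp : p ∈ S) : p ∈ V := by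
  unfold um at h
  rw [List.length_eq_zero_iff, List.filter_eq_nil_iff] at h
  have := h p hp
  simpa using this

theorem um_le_length (S V : PySem.Set (Int × Int)) : um S V ≤ S.length := by
  unfold um
  exact List.length_filter_le _ _

theorem flood_eq_dfs (S : PySem.Set (Int × Int)) :
    ∀ (f : Nat) (p : Int × Int) (stack : List (Int × Int)) (V : PySem.Set (Int × Int)) (c : Int),
      um S V ≤ f →
      flood S (p :: stack) V c
        = flood S stack (get_cluster_size S f p V).1 (c + (get_cluster_size S f p V).2) := by
  intro f
  induction f with
  | zero =>
    intro p stack V c hf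
    have h0 : um S V = 0 := Nat.le_zero.mp hf
    have hc : (V.contains p || !(S.contains p)) = true := by
      by_cases hp : p ∈ S
      · simp [um_zero_mem S V p h0 hp]
      · simp [hp]
    rw [flood, if_pos hc, get_cluster_size]
    simp
  | succ f ih =>
    intro p stack V c hf
    by_cases hc : (V.contains p || !(S.contains p)) = true
    · rw [flood, if_pos hc, get_cluster_size, if_pos hc]
      simp
    · have hvp : p ∉ V := by
        intro hm
        exact hc (by simp [hm])
      have hsp : p ∈ S := by
        by_contra hm
        exact hc (by simp [hm])
      have h0 : um S (V.add p) ≤ f := by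
        have := um_add_lt S V p hsp hvp
        omega
      have h1 : um S (get_cluster_size S f (p.1, p.2 + 1) (V.add p)).1 ≤ f :=
        le_trans (um_mono S _ _ (fun q hq => get_cluster_size_mono S f _ _ q hq)) h0
      have h2 : um S (get_cluster_size S f (p.1, p.2 - 1)
          (get_cluster_size S f (p.1, p.2 + 1) (V.add p)).1).1 ≤ f :=
        le_trans (um_mono S _ _ (fun q hq => get_cluster_size_mono S f _ _ q hq)) h1
      have h3 : um S (get_cluster_size S f (p.1 + 1, p.2)
          (get_cluster_size S f (p.1, p.2 - 1)
            (get_cluster_size S f (p.1, p.2 + 1) (V.add p)).1).1).1 ≤ f :=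
        le_trans (um_mono S _ _ (fun q hq => get_cluster_size_mono S f _ _ q hq)) h2
      rw [flood, if_neg hc, get_cluster_size, if_neg hc]
      dsimp only
      rw [ih (p.1, p.2 + 1) _ (V.add p) (c + 1) h0]
      rw [ih (p.1, p.2 - 1) _ _ _ h1]
      rw [ih (p.1 + 1, p.2) _ _ _ h2]
      rw [ih (p.1 - 1, p.2) _ _ _ h3]
      congr 1
      ring

theorem has_eq (positions : List (Int × Int)) :
    has_large_cluster positions = has_big_component positions := by
  rw [has_large_cluster, has_big_component]
  cases hemp : positions.isEmpty with
  | true => simp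
  | false =>
    simp only [Bool.false_eq_true, if_false]
    have hfun :
        (fun (st : PySem.Set (Int × Int) × Int) start =>
          if st.1.contains start then st
          else
            let r := flood (PySem.Set.ofList positions) [start] st.1 0
            (r.1, max st.2 r.2))
        = (fun (st : PySem.Set (Int × Int) × Int) pos =>
          if st.1.contains pos then st
          else
            let r := get_cluster_size (PySem.Set.ofList positions)
              (PySem.Set.ofList positions).length pos st.1
            (r.1, max st.2 r.2)) := by
      funext st pos
      by_cases hvc : pos ∈ st.1
      · simp [hvc]
      · have key := flood_eq_dfs (PySem.Set.ofList positions)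
          (PySem.Set.ofList positions).length pos [] st.1 0
          (um_le_length _ _)
        conv at key => rhs; rw [flood]
        simp only [zero_add] at key
        simp [hvc, key]
    rw [hfun]

theorem step_positions_map (robots : List (Int × Int × Int × Int)) (t : Nat) :
    step_positions (robots.map (fun robot => get_position_at_time robot (t : Int)))
        (robots.map (fun r => (r.2.2.1, r.2.2.2)))
      = robots.map (fun robot => get_position_at_time robot ((t + 1 : Nat) : Int)) := by
  unfold step_positions
  rw [List.zip_map', List.map_map]
  apply List.map_congr_left
  intro r _
  unfold get_position_at_time
  simp only [Function.comp]
  have h101 : (0:Int) < 101 := by norm_num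
  have h103 : (0:Int) < 103 := by norm_num
  rw [PySem.Int.mod_eq_emod_of_pos h101, PySem.Int.mod_eq_emod_of_pos h101,
      PySem.Int.mod_eq_emod_of_pos h101, PySem.Int.mod_eq_emod_of_pos h103,
      PySem.Int.mod_eq_emod_of_pos h103, PySem.Int.mod_eq_emod_of_pos h103]
  simp only [Prod.mk.injEq]
  refine ⟨?_, ?_⟩
  · rw [Int.emod_add_emod]
    congr 1
    push_cast
    ring
  · rw [Int.emod_add_emod]
    congr 1
    push_cast
    ring

theorem find_loop_eq (robots : List (Int × Int × Int × Int)) :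
    ∀ (rem t : Nat),
      find_loop robots t rem
        = find_loop_alt (robots.map (fun r => (r.2.2.1, r.2.2.2)))
            (robots.map (fun robot => get_position_at_time robot (t : Int))) t rem := by
  intro rem
  induction rem with
  | zero => intro t; rfl
  | succ rem ih =>
    intro t
    rw [find_loop, find_loop_alt]
    simp only [has_eq]
    by_cases hc : has_big_component
        (robots.map (fun robot => get_position_at_time robot (t : Int))) = true
    · simp [hc]
    · simp only [hc, Bool.false_eq_true, if_false]
      rw [ih (t + 1), step_positions_map]

theorem init_positions (robots : List (Int × Int × Int × Int)) :
    robots.map (fun robot => get_position_at_time robot ((0 : Nat) : Int))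
      = robots.map (fun r => (PySem.Int.mod r.1 101, PySem.Int.mod r.2.1 103)) := by
  apply List.map_congr_left
  intro r _
  unfold get_position_at_time
  norm_num

-- ===== VERDICT (by name: the statement is the Claim_ definition above) =====
theorem find_christmas_tree_spec : Claim_equal_find_christmas_tree := by
  intro robots _
  unfold Spec_find_christmas_tree find_christmas_tree find_christmas_tree_alt
  rw [find_loop_eq robots 10000 0, init_positions]
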